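-- pv_equiv track=rewrite | github.com/vidjil/vidjil | algo/tests/gb-to-should.py | parse_gb
-- ===== SOURCE A (Python) =====
-- def parse_gb(stream):
--     phase = 0
--     labels = []
--     seqs = []
--
--     for l in stream:
--
--         l = l.strip()
--
--         if l.startswith("FEATURES"):
--             phase = 1
--             continue
--
--         if l == "ORIGIN":
--             phase = 2
--             continue
--
--         if l == "//":
--             phase = 3
--             continue
--
--         if not phase in [1, 2]:
--             continue
--
--         if phase == 1 and l.startswith('/label'):
--             label = l.split('=')[1]
--             if not 'TR' in label:
--                 continue
--             labels += [label]
--             continue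
--
--         if phase == 2:
--             seq = ''.join(l.split(' ')[1:])
--             seqs += [seq]
--             continue
--
--     # print "! Not parsed:", l
--
--     return labels, seqs
-- ===== SOURCE B (Python) =====
-- def parse_gb(stream):
--     # Two-pass decomposition: annotate each stripped line with its section phase,
--     # then filter/map the annotated lines into labels and seqs.
--     lines = [l.strip() for l in stream]
--
--     def marker(l):
--         if l.startswith("FEATURES"):
--             return 1
--         if l == "ORIGIN":
--             return 2
--         if l == "//":
--             return 3
--         return 0
--
--     phases = []
--     ph = 0
--     for l in lines:
--         m = marker(l)
--         phases.append(0 if m else ph)  # marker lines belong to no section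
--         if m:
--             ph = m
--
--     labels = []
--     for l, p in zip(lines, phases):
--         if p == 1 and l.startswith('/label'):
--             label = l.split('=')[1]
--             if 'TR' in label:
--                 labels.append(label)
--
--     seqs = [''.join(l.split(' ')[1:]) for l, p in zip(lines, phases) if p == 2]
--     return labels, seqs
-- ===== Notes on version B (the rewrite author's own statement) =====
-- stated objective: alternative
-- what changed: Replaces A's single-pass phase state machine that accumulates outputs inline with a two-pass decomposition: first annotate every stripped line with its section phase, then build labels and seqs by filtering/mapping the annotated lines.
import Mathlib
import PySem

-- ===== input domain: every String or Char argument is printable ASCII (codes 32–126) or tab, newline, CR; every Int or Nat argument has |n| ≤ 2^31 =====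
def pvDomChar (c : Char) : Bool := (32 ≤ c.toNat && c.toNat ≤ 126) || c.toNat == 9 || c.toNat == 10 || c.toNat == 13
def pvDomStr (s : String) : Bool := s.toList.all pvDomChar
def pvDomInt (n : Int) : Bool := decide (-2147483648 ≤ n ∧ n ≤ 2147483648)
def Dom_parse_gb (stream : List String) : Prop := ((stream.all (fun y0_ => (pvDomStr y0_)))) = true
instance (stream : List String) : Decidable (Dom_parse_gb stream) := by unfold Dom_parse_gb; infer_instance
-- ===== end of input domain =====

-- B replaces A's online phase state machine by a two-pass decomposition (annotate each
-- stripped line with its phase, then filter/map); objective: alternative, same cost.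

-- ===== PORT A =====
-- one loop iteration of A: state (phase, labels, seqs)
def pvStepA (st : Nat × List String × List String) (l0 : String) : Nat × List String × List String :=
  let l := PySem.Str.strip l0
  if PySem.Str.startswith l "FEATURES" then (1, st.2.1, st.2.2)
  else if l == "ORIGIN" then (2, st.2.1, st.2.2)
  else if l == "//" then (3, st.2.1, st.2.2)
  else if ¬ (st.1 ∈ ([1, 2] : List Nat)) then st
  else if st.1 = 1 ∧ PySem.Str.startswith l "/label" then
    -- l.split('=')[1]: Python raises IndexError when '=' is absent; Pre_ excludes that
    let label := (PySem.List.pyGet? ((PySem.Str.split? l "=").getD []) 1).getD ""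
    if ¬ PySem.Str.isIn "TR" label then st
    else (st.1, st.2.1 ++ [label], st.2.2)
  else if st.1 = 2 then
    -- ''.join(l.split(' ')[1:])
    (st.1, st.2.1, st.2.2 ++ [PySem.Str.join "" (((PySem.Str.split? l " ").getD []).drop 1)])
  else st

def parse_gb (stream : List String) : List String × List String :=
  let r := stream.foldl pvStepA (0, [], [])
  (r.2.1, r.2.2)

-- ===== PORT B =====
def pvMarker (l : String) : Nat :=
  if PySem.Str.startswith l "FEATURES" then 1
  else if l == "ORIGIN" then 2
  else if l == "//" then 3
  else 0

-- the phase annotation of each line (marker lines belong to no section)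
def pvPhases : List String → Nat → List Nat
  | [], _ => []
  | l :: ls, ph =>
    let m := pvMarker l
    (if m ≠ 0 then 0 else ph) :: pvPhases ls (if m ≠ 0 then m else ph)

def pvLabelStep (acc : List String) (lp : String × Nat) : List String :=
  if lp.2 = 1 ∧ PySem.Str.startswith lp.1 "/label" then
    let label := (PySem.List.pyGet? ((PySem.Str.split? lp.1 "=").getD []) 1).getD ""
    if PySem.Str.isIn "TR" label then acc ++ [label] else acc
  else acc

def parse_gb_alt (stream : List String) : List String × List String :=
  let lines := stream.map PySem.Str.strip
  let zipped := lines.zip (pvPhases lines 0)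
  let labels := zipped.foldl pvLabelStep []
  let seqs := zipped.filterMap (fun lp =>
    if lp.2 = 2 then some (PySem.Str.join "" (((PySem.Str.split? lp.1 " ").getD []).drop 1)) else none)
  (labels, seqs)

-- ===== PRECONDITION & SPEC =====
-- stripped line i of the stream (out-of-range reads give "", harmless: i is always bounded below)
def pvLine (stream : List String) (i : Nat) : String := PySem.Str.strip (stream.getD i "")

-- Pre_ excludes exactly the inputs on which Python A raises IndexError: a stripped line that
-- starts with '/label' but contains no '=' and whose nearest preceding section marker is a
-- FEATURES line (i.e. the line is read in the FEATURES phase, where A indexes l.split('=')[1]).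
def Pre_parse_gb (stream : List String) : Prop :=
  ∀ i < stream.length,
    PySem.Str.startswith (pvLine stream i) "/label" = true →
    PySem.Str.isIn "=" (pvLine stream i) = false →
    ∀ j < i, PySem.Str.startswith (pvLine stream j) "FEATURES" = true →
      ∃ k < i, j < k ∧ (PySem.Str.startswith (pvLine stream k) "FEATURES" = true ∨
                        pvLine stream k = "ORIGIN" ∨ pvLine stream k = "//")
instance (stream : List String) : Decidable (Pre_parse_gb stream) := by
  unfold Pre_parse_gb; apply Nat.decidableBallLT

def pvWitness_parse_gb : List String :=
  ["LOCUS x", "FEATURES", "  /label=TRBV1 ", "/label=foo", "ORIGIN", "1 acgt acgt", "//"]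

def Spec_parse_gb (stream : List String) (out : List String × List String) : Prop := out = parse_gb_alt stream
instance (stream : List String) (out : List String × List String) : Decidable (Spec_parse_gb stream out) := by unfold Spec_parse_gb; infer_instance

-- ===== CLAIM (what is proved, stated in full; the proofs are below) =====
def Claim_equal_parse_gb : Prop := ∀ (stream : List String), Dom_parse_gb stream → Pre_parse_gb stream → Spec_parse_gb stream (parse_gb stream)

-- ===== LEMMAS AND PROOFS =====
-- final phase of A's machine (proof helper only)
def pvPhEnd : List String → Nat → Nat
  | [], ph => ph
  | l :: ls, ph => pvPhEnd ls (if pvMarker l ≠ 0 then pvMarker l else ph)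

set_option maxHeartbeats 1600000 in
theorem pvMain (xs : List String) : ∀ (ph : Nat) (labels seqs : List String),
    xs.foldl pvStepA (ph, labels, seqs) =
      (pvPhEnd (xs.map PySem.Str.strip) ph,
       ((xs.map PySem.Str.strip).zip (pvPhases (xs.map PySem.Str.strip) ph)).foldl pvLabelStep labels,
       seqs ++ ((xs.map PySem.Str.strip).zip (pvPhases (xs.map PySem.Str.strip) ph)).filterMap
         (fun lp => if lp.2 = 2 then some (PySem.Str.join "" (((PySem.Str.split? lp.1 " ").getD []).drop 1)) else none)) := by
  induction xs with
  | nil => intro ph labels seqs; simp [pvPhEnd, pvPhases]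
  | cons x xs ih =>
    intro ph labels seqs
    by_cases h1 : PySem.Chars.startswith (PySem.Chars.strip x.toList) ['F','E','A','T','U','R','E','S'] = true
    · simp [pvStepA, pvMarker, pvPhases, pvPhEnd, pvLabelStep, h1, ih]
    · by_cases h2 : PySem.Str.strip x = "ORIGIN"
      · have hO : PySem.Chars.startswith ['O','R','I','G','I','N'] ['F','E','A','T','U','R','E','S'] = false := by decide
        simp [pvStepA, pvMarker, pvPhases, pvPhEnd, pvLabelStep, h2, hO, ih]
      · by_cases h3 : PySem.Str.strip x = "//"
        · have hS : PySem.Chars.startswith ['/','/'] ['F','E','A','T','U','R','E','S'] = false := by decide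
          simp [pvStepA, pvMarker, pvPhases, pvPhEnd, pvLabelStep, h3, hS, ih]
        · by_cases h4 : ph = 1
          · subst h4
            by_cases h5 : PySem.Chars.startswith (PySem.Chars.strip x.toList) ['/','l','a','b','e','l'] = true
            · by_cases h6 : PySem.Chars.isIn ['T','R'] ((PySem.List.pyGet? ((PySem.Str.split? (PySem.Str.strip x) "=").getD []) 1).getD "").toList = true
              · simp [pvStepA, pvMarker, pvPhases, pvPhEnd, pvLabelStep, h1, h2, h3, h5, h6, ih]
              · simp [pvStepA, pvMarker, pvPhases, pvPhEnd, pvLabelStep, h1, h2, h3, h5, h6, ih]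
            · simp [pvStepA, pvMarker, pvPhases, pvPhEnd, pvLabelStep, h1, h2, h3, h5, ih]
          · by_cases h7 : ph = 2
            · subst h7
              simp [pvStepA, pvMarker, pvPhases, pvPhEnd, pvLabelStep, h1, h2, h3, ih]
            · simp [pvStepA, pvMarker, pvPhases, pvPhEnd, pvLabelStep, h1, h2, h3, h4, h7, ih]

-- ===== VERDICT (by name: the statement is the Claim_ definition above) =====
theorem parse_gb_spec : Claim_equal_parse_gb := by
  intro stream _ _
  unfold Spec_parse_gb parse_gb parse_gb_alt
  simp [pvMain]
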